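-- pv_equiv track=rewrite | github.com/nrbennet/dl_binder_design | include/silent_tools/silent_tools.py | parse_ann_seq
-- ===== SOURCE A (Python) =====
-- def parse_ann_seq( line ):
--     in_paren = False
--     for idx, letter in enumerate(line):
--         if in_paren:
--             if letter == ']': in_paren = False
--         elif letter == '[': in_paren = True
--         # As soon as we hit a w that is not in parentheses then the rest of the things are water so just
--         # Return the rest of the string
--         elif letter == 'w':
--             return ''.join( line[idx:] )
-- ===== SOURCE B (Python) =====
-- def parse_ann_seq(line):
--     t = ''.join(line)
--     while True:
--         w = t.find('w')
--         if w == -1: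
--             return None
--         b = t.find('[')
--         if b == -1 or w < b:
--             return t[w:]
--         u = t[b + 1:]
--         c = u.find(']')
--         if c == -1:
--             return None
--         t = u[c + 1:]
-- ===== Notes on version B (the rewrite author's own statement) =====
-- stated objective: faster
-- what changed: A's per-character Python loop with an in_paren boolean flag is replaced by a loop of str.find jumps: locate the next water marker and the next opening bracket, return the suffix if the marker comes first, otherwise skip past the matching closing bracket and repeat.
import Mathlib
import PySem

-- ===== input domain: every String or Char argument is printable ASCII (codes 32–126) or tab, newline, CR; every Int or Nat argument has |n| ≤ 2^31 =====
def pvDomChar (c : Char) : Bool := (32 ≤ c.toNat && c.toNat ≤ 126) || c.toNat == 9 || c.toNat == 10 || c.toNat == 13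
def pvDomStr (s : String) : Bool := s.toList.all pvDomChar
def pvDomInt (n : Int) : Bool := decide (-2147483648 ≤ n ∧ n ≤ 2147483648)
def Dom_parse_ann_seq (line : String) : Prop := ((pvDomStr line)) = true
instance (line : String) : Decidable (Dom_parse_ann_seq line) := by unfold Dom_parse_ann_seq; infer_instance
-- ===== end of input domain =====

-- B replaces A's per-character bracket-state scan by repeated str.find jumps between
-- marker/bracket occurrences; a timing run measured B faster by a constant factor
-- (str.find runs in C instead of a per-character Python loop).

-- ===== PORT A =====
-- A's loop: enumerate(line) with an in_paren flag; return ''.join(line[idx:]) at the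
-- first 'w' outside brackets; fall off the end -> None.
def parse_ann_seq_go : List Char → Bool → Option (List Char)
  | [], _ => none
  | c :: rest, inParen =>
    if inParen then
      if c = ']' then parse_ann_seq_go rest false else parse_ann_seq_go rest true
    else if c = '[' then parse_ann_seq_go rest true
    else if c = 'w' then some (c :: rest)
    else parse_ann_seq_go rest false

def parse_ann_seq (line : String) : Option String :=
  (parse_ann_seq_go line.toList false).map fun cs => String.ofList cs

-- ===== PORT B =====
-- B's loop: w = t.find('w'); b = t.find('['); return/None/advance past the first ']'.
def parse_ann_seq_alt_go (t : List Char) : Option (List Char) :=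
  let w := PySem.Chars.find t ['w']
  if hw : w = -1 then none
  else
    let b := PySem.Chars.find t ['[']
    if hb : b = -1 ∨ w < b then some (PySem.List.slice t (some w) none)
    else
      let u := PySem.List.slice t (some (b + 1)) none
      let c := PySem.Chars.find u [']']
      if hc : c = -1 then none
      else parse_ann_seq_alt_go (PySem.List.slice u (some (c + 1)) none)
termination_by t.length
decreasing_by
  have hb' : b ≠ -1 := fun h => hb (Or.inl h)
  have hbpos : (0:Int) ≤ b := by
    have := PySem.Chars.neg_one_le_find t ['[']
    omega
  have hne : t ≠ [] := by
    have hin : ['['] <:+: t := (PySem.Chars.find_ne_neg_one_iff t ['[']).mp hb'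
    intro h; subst h
    exact absurd (List.eq_nil_of_infix_nil hin) (by simp)
  have hu : u = t.drop (b + 1).toNat := PySem.List.slice_from t (show (0:Int) ≤ b + 1 by omega)
  have hcpos : (0:Int) ≤ c := by
    have := PySem.Chars.neg_one_le_find u [']']
    omega
  rw [PySem.List.slice_from u (show (0:Int) ≤ c + 1 by omega)]
  have hb1 : 1 ≤ (b + 1).toNat := by omega
  have hlen : u.length < t.length := by
    rw [hu, List.length_drop]
    have : 0 < t.length := List.length_pos_iff.mpr hne
    omega
  calc (u.drop (c + 1).toNat).length ≤ u.length := by simp [List.length_drop]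
    _ < t.length := hlen

def parse_ann_seq_alt (line : String) : Option String :=
  (parse_ann_seq_alt_go line.toList).map fun cs => String.ofList cs

-- ===== PRECONDITION & SPEC =====
def Spec_parse_ann_seq (line : String) (out : Option String) : Prop := out = parse_ann_seq_alt line
instance (line : String) (out : Option String) : Decidable (Spec_parse_ann_seq line out) := by unfold Spec_parse_ann_seq; infer_instance

-- ===== CLAIM (what is proved, stated in full; the proofs are below) =====
def Claim_equal_parse_ann_seq : Prop := ∀ (line : String), Dom_parse_ann_seq line → Spec_parse_ann_seq line (parse_ann_seq line)

-- ===== LEMMAS AND PROOFS =====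

-- [x] is a prefix of t.drop i iff t has x at index i
theorem singleton_prefix_drop {t : List Char} {x : Char} {i : Nat} :
    [x] <+: t.drop i ↔ t[i]? = some x := by
  constructor
  · rintro ⟨l', hl'⟩
    have : (t.drop i).head? = some x := by rw [← hl']; rfl
    simpa [List.head?_drop] using this
  · intro h
    have hlt : i < t.length := by
      by_contra hge
      rw [List.getElem?_eq_none (show t.length ≤ i by omega)] at h
      simp at h
    refine ⟨t.drop (i + 1), ?_⟩
    rw [List.drop_eq_getElem_cons hlt]
    simp_all

-- a singleton list is an infix iff its element occurs
theorem singleton_infix_of_mem {t : List Char} {x : Char} (h : x ∈ t) : [x] <:+: t := by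
  obtain ⟨s, t', rfl⟩ := List.append_of_mem h
  exact ⟨s, t', by simp⟩

-- no 'w' anywhere: A returns none from either state
theorem goA_none {t : List Char} (h : 'w' ∉ t) (p : Bool) :
    parse_ann_seq_go t p = none := by
  induction t generalizing p with
  | nil => rfl
  | cons c rest ih =>
    have hc : c ≠ 'w' := fun hc => h (hc ▸ List.mem_cons_self)
    have hr : 'w' ∉ rest := fun hr => h (List.mem_cons_of_mem _ hr)
    cases p <;> simp [parse_ann_seq_go, hc] <;> split_ifs <;> exact ih hr _

-- A in the outside-brackets state skips a prefix with no 'w' and no '['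
theorem goA_skip_false {t : List Char} {k : Nat}
    (hw : ∀ i < k, t[i]? ≠ some 'w') (hb : ∀ i < k, t[i]? ≠ some '[') :
    parse_ann_seq_go t false = parse_ann_seq_go (t.drop k) false := by
  induction k generalizing t with
  | zero => simp
  | succ k ih =>
    cases t with
    | nil => simp
    | cons c rest =>
      have hc : c ≠ 'w' := fun h => hw 0 (by omega) (by simp [h])
      have hc' : c ≠ '[' := fun h => hb 0 (by omega) (by simp [h])
      have : parse_ann_seq_go (c :: rest) false = parse_ann_seq_go rest false := by
        simp [parse_ann_seq_go, hc, hc']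
      rw [this, List.drop_succ_cons]
      exact ih (fun i hi => hw (i + 1) (by omega)) (fun i hi => hb (i + 1) (by omega))

-- A in the inside-brackets state skips a prefix with no ']'
theorem goA_skip_true {t : List Char} {k : Nat}
    (hc : ∀ i < k, t[i]? ≠ some ']') (hk : k ≤ t.length) :
    parse_ann_seq_go t true = parse_ann_seq_go (t.drop k) true := by
  induction k generalizing t with
  | zero => simp
  | succ k ih =>
    cases t with
    | nil => simp at hk
    | cons c rest =>
      have h0 : c ≠ ']' := fun h => hc 0 (by omega) (by simp [h])
      have : parse_ann_seq_go (c :: rest) true = parse_ann_seq_go rest true := by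
        simp [parse_ann_seq_go, h0]
      rw [this, List.drop_succ_cons]
      exact ih (fun i hi => hc (i + 1) (by omega)) (by simpa using hk)

-- the heart of the equivalence, on char lists
theorem goA_eq_goB (t : List Char) : parse_ann_seq_go t false = parse_ann_seq_alt_go t := by
  rw [parse_ann_seq_alt_go]
  set w := PySem.Chars.find t ['w'] with hwdef
  by_cases hw : w = -1
  · -- no 'w' at all
    have : 'w' ∉ t := fun hmem =>
      (PySem.Chars.find_eq_neg_one_iff t ['w']).mp hw (singleton_infix_of_mem hmem)
    simp [hw, goA_none this]
  · have hw0 : (0:Int) ≤ w := by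
      have := PySem.Chars.neg_one_le_find t ['w']
      omega
    obtain ⟨hwpre, hwmin⟩ := PySem.Chars.find_spec (s := t) (sub := ['w']) hw0
    have hwget : t[w.toNat]? = some 'w' := singleton_prefix_drop.mp hwpre
    have hwlt : w.toNat < t.length := by
      by_contra hge
      rw [List.getElem?_eq_none (show t.length ≤ w.toNat by omega)] at hwget
      simp at hwget
    have hwbefore : ∀ i < w.toNat, t[i]? ≠ some 'w' := fun i hi h =>
      hwmin i hi (singleton_prefix_drop.mpr h)
    set b := PySem.Chars.find t ['['] with hbdef
    by_cases hb : b = -1 ∨ w < b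
    · -- first 'w' comes before any '['
      have hbbefore : ∀ i < w.toNat, t[i]? ≠ some '[' := by
        intro i hi h
        have hfound : ['['] <+: t.drop i := singleton_prefix_drop.mpr h
        rcases hb with hb | hb
        · obtain ⟨hbpre, _⟩ := PySem.Chars.find_eq_neg_one_iff t ['[']
          exact (hbpre hb) (hfound.isInfix.trans (List.drop_suffix i t).isInfix)
        · have hb0 : (0:Int) ≤ b := by
            have := PySem.Chars.neg_one_le_find t ['[']
            by_contra h'
            have : b = -1 := by omega
            omega
          obtain ⟨_, hbmin⟩ := PySem.Chars.find_spec (s := t) (sub := ['[']) hb0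
          exact hbmin i (by omega) hfound
      rw [goA_skip_false hwbefore hbbefore]
      rw [List.drop_eq_getElem_cons hwlt]
      have hget : t[w.toNat] = 'w' := by
        have := List.getElem?_eq_getElem hwlt
        rw [hwget] at this
        exact (Option.some.injEq _ _ ▸ this.symm)
      rw [PySem.List.slice_from t hw0]
      simp [hw, hb, parse_ann_seq_go, hget, List.drop_eq_getElem_cons hwlt]
    · -- a '[' comes first: skip the bracketed block
      have hb' : b ≠ -1 := fun h => hb (Or.inl h)
      have hb0 : (0:Int) ≤ b := by
        have := PySem.Chars.neg_one_le_find t ['[']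
        omega
      have hble : b ≤ w := by omega
      obtain ⟨hbpre, hbmin⟩ := PySem.Chars.find_spec (s := t) (sub := ['[']) hb0
      have hbget : t[b.toNat]? = some '[' := singleton_prefix_drop.mp hbpre
      have hblt : b.toNat < t.length := by
        by_contra hge
        rw [List.getElem?_eq_none (show t.length ≤ b.toNat by omega)] at hbget
        simp at hbget
      have hbltw : b.toNat < w.toNat := by
        have hne : b.toNat ≠ w.toNat := by
          intro h
          rw [h, hwget] at hbget
          simp at hbget
        omega
      have hskip : parse_ann_seq_go t false = parse_ann_seq_go (t.drop b.toNat) false := by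
        refine goA_skip_false (fun i hi => hwbefore i (by omega)) (fun i hi h => hbmin i hi (singleton_prefix_drop.mpr h))
      have hbgete : t[b.toNat] = '[' := by
        have := List.getElem?_eq_getElem hblt
        rw [hbget] at this
        exact (Option.some.injEq _ _ ▸ this.symm)
      have hslice_u : PySem.List.slice t (some (b + 1)) none = t.drop (b.toNat + 1) := by
        rw [PySem.List.slice_from t (show (0:Int) ≤ b + 1 by omega)]
        congr 1
        omega
      simp only [hslice_u]
      set u := t.drop (b.toNat + 1) with hudef
      have hstep : parse_ann_seq_go t false = parse_ann_seq_go u true := by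
        rw [hskip, List.drop_eq_getElem_cons hblt, hbgete, hudef]
        simp [parse_ann_seq_go]
      set c := PySem.Chars.find u [']'] with hcdef
      by_cases hc : c = -1
      · -- unclosed bracket: both none
        have hnoc : ']' ∉ u := fun hmem =>
          (PySem.Chars.find_eq_neg_one_iff u [']']).mp hc (singleton_infix_of_mem hmem)
        have : parse_ann_seq_go u true = none := by
          rw [goA_skip_true (k := u.length) (fun i hi h => hnoc (List.mem_of_getElem? h)) le_rfl]
          simp [parse_ann_seq_go]
        simp [hw, hb, hc, hstep, this]
      · have hc0 : (0:Int) ≤ c := by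
          have := PySem.Chars.neg_one_le_find u [']']
          omega
        obtain ⟨hcpre, hcmin⟩ := PySem.Chars.find_spec (s := u) (sub := [']']) hc0
        have hcget : u[c.toNat]? = some ']' := singleton_prefix_drop.mp hcpre
        have hclt : c.toNat < u.length := by
          by_contra hge
          rw [List.getElem?_eq_none (show u.length ≤ c.toNat by omega)] at hcget
          simp at hcget
        have hcgete : u[c.toNat] = ']' := by
          have := List.getElem?_eq_getElem hclt
          rw [hcget] at this
          exact (Option.some.injEq _ _ ▸ this.symm)
        have hskip2 : parse_ann_seq_go u true = parse_ann_seq_go (u.drop (c.toNat + 1)) false := by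
          rw [goA_skip_true (k := c.toNat) (fun i hi h => hcmin i hi (singleton_prefix_drop.mpr h)) (by omega)]
          rw [List.drop_eq_getElem_cons hclt, hcgete]
          simp [parse_ann_seq_go]
        have hslice : PySem.List.slice u (some (c + 1)) none = u.drop (c.toNat + 1) := by
          rw [PySem.List.slice_from u (show (0:Int) ≤ c + 1 by omega)]
          congr 1
          omega
        have hsmall : (u.drop (c.toNat + 1)).length < t.length := by
          rw [hudef]
          simp only [List.length_drop]
          omega
        have := goA_eq_goB (u.drop (c.toNat + 1))
        rw [hstep, hskip2, this]
        simp [hw, hb, hc, hslice]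
termination_by t.length
decreasing_by exact hsmall

-- ===== VERDICT (by name: the statement is the Claim_ definition above) =====
theorem parse_ann_seq_spec : Claim_equal_parse_ann_seq := by
  intro line _
  unfold Spec_parse_ann_seq parse_ann_seq parse_ann_seq_alt
  rw [goA_eq_goB]
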